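-- pv_equiv track=rewrite | github.com/Filter-Bubble/e2e-Dutch | e2edutch/conll.py | get_prediction_map
-- ===== SOURCE A (Python) =====
-- import operator
-- import collections
--
-- def get_prediction_map(predictions):
--     prediction_map = {}
--     for doc_key, clusters in predictions.items():
--         start_map = collections.defaultdict(list)
--         end_map = collections.defaultdict(list)
--         word_map = collections.defaultdict(list)
--         for cluster_id, mentions in enumerate(clusters):
--             for start, end in mentions:
--                 if start == end:
--                     word_map[start].append(cluster_id)
--                 else:
--                     start_map[start].append((cluster_id, end))
--                     end_map[end].append((cluster_id, start))
--         for k, v in start_map.items():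
--             start_map[k] = [cluster_id for cluster_id, end in sorted(
--                 v, key=operator.itemgetter(1), reverse=True)]
--         for k, v in end_map.items():
--             end_map[k] = [cluster_id for cluster_id, start in sorted(
--                 v, key=operator.itemgetter(1), reverse=True)]
--         prediction_map[doc_key] = (start_map, end_map, word_map)
--     return prediction_map
-- ===== SOURCE B (Python) =====
-- import operator
-- import collections
--
--
-- def get_prediction_map(predictions):
--     prediction_map = {}
--     for doc_key, clusters in predictions.items():
--         # one flat pass: split mentions into word mentions and proper spans
--         words = []
--         spans = []
--         for cluster_id, mentions in enumerate(clusters):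
--             for start, end in mentions:
--                 if start == end:
--                     words.append((cluster_id, start))
--                 else:
--                     spans.append((cluster_id, start, end))
--         start_map = collections.defaultdict(list)
--         end_map = collections.defaultdict(list)
--         word_map = collections.defaultdict(list)
--         # create the buckets in first-mention order
--         for cluster_id, start, end in spans:
--             start_map[start] = []
--             end_map[end] = []
--         # one global stable sort per map, then distribute: each bucket
--         # receives its cluster ids already in the required order
--         for cluster_id, start, end in sorted(spans, key=operator.itemgetter(2), reverse=True):
--             start_map[start].append(cluster_id)
--         for cluster_id, start, end in sorted(spans, key=operator.itemgetter(1), reverse=True):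
--             end_map[end].append(cluster_id)
--         for cluster_id, start in words:
--             word_map[start].append(cluster_id)
--         prediction_map[doc_key] = (start_map, end_map, word_map)
--     return prediction_map
-- ===== Notes on version B (the rewrite author's own statement) =====
-- stated objective: alternative
-- what changed: Instead of appending (cluster_id, other_endpoint) pairs into per-key buckets and then stably sorting every bucket, B flattens the mentions into one list of span triples, does one global stable sort per map (by end, then by start) and distributes bare cluster ids into pre-created buckets, so each bucket is built already in order and no per-bucket sort or pair-stripping pass exists.
import Mathlib
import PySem

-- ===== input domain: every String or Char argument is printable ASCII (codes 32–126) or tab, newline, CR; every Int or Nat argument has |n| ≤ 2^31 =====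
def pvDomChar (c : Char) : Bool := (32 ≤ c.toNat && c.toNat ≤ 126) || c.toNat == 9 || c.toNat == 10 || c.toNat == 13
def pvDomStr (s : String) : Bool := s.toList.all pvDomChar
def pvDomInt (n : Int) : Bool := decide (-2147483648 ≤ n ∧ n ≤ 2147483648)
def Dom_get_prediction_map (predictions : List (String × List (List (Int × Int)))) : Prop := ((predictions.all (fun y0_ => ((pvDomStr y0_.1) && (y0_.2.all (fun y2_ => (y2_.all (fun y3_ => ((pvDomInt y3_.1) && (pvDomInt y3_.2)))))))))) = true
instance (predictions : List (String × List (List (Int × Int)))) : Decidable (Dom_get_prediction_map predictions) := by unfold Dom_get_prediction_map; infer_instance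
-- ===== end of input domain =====

-- B replaces A's per-bucket stable sorts by one global stable sort per map, distributed
-- into pre-created buckets (objective: alternative; no speed claim).

-- ===== PORT A =====
-- per-doc body of A: build the three defaultdicts, then stably sort every bucket in place
def pyADoc (clusters : List (List (Int × Int))) :
    (List (Int × List Int)) × (List (Int × List Int)) × (List (Int × List Int)) :=
  let sew := (PySem.List.enumerate clusters).foldl (fun sew ce =>
      ce.2.foldl (fun sew m =>
        if m.1 == m.2 then
          (sew.1, sew.2.1, sew.2.2.modify m.1 [] (fun l => l ++ [ce.1]))
        else
          (sew.1.modify m.1 [] (fun l => l ++ [(ce.1, m.2)]),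
           sew.2.1.modify m.2 [] (fun l => l ++ [(ce.1, m.1)]),
           sew.2.2)) sew)
    ((PySem.Dict.empty : PySem.Dict Int (List (Int × Int))),
     (PySem.Dict.empty : PySem.Dict Int (List (Int × Int))),
     (PySem.Dict.empty : PySem.Dict Int (List Int)))
  -- for k, v in start_map.items(): start_map[k] = [cid for cid, end in sorted(v, key=snd, reverse=True)]
  -- (the loop replaces EVERY value, changing its type from pairs to ints; Lean dicts are
  -- homogeneous, so the same loop re-inserts each key in order into an empty dict)
  let s2 := sew.1.items.foldl (fun d kv =>
      d.insert kv.1 ((PySem.List.sorted kv.2 (fun p => p.2) true).map (fun p => p.1)))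
      (PySem.Dict.empty : PySem.Dict Int (List Int))
  let e2 := sew.2.1.items.foldl (fun d kv =>
      d.insert kv.1 ((PySem.List.sorted kv.2 (fun p => p.2) true).map (fun p => p.1)))
      (PySem.Dict.empty : PySem.Dict Int (List Int))
  (s2.items, e2.items, sew.2.2.items)

def get_prediction_map (predictions : List (String × List (List (Int × Int)))) :
    List (String × (List (Int × List Int)) × (List (Int × List Int)) × (List (Int × List Int))) :=
  (predictions.foldl (fun pm dc => pm.insert dc.1 (pyADoc dc.2)) PySem.Dict.empty).items

-- ===== PORT B =====
-- per-doc body of B: flatten into word/span lists, prime the buckets in first-mention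
-- order, then one global stable sort per map and distribute the cluster ids
def pyBDoc (clusters : List (List (Int × Int))) :
    (List (Int × List Int)) × (List (Int × List Int)) × (List (Int × List Int)) :=
  let ws := (PySem.List.enumerate clusters).foldl (fun ws ce =>
      ce.2.foldl (fun ws m =>
        if m.1 == m.2 then (ws.1 ++ [(ce.1, m.1)], ws.2)
        else (ws.1, ws.2 ++ [(ce.1, m.1, m.2)])) ws) (([] : List (Int × Int)), ([] : List (Int × Int × Int)))
  let words := ws.1
  let spans := ws.2
  let pr := spans.foldl (fun pr p =>
      (pr.1.insert p.2.1 ([] : List Int), pr.2.insert p.2.2 ([] : List Int)))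
    ((PySem.Dict.empty : PySem.Dict Int (List Int)), (PySem.Dict.empty : PySem.Dict Int (List Int)))
  let s1 := (PySem.List.sorted spans (fun p => p.2.2) true).foldl
      (fun d p => d.modify p.2.1 [] (fun l => l ++ [p.1])) pr.1
  let e1 := (PySem.List.sorted spans (fun p => p.2.1) true).foldl
      (fun d p => d.modify p.2.2 [] (fun l => l ++ [p.1])) pr.2
  let w1 := words.foldl (fun d p => d.modify p.2 [] (fun l => l ++ [p.1]))
      (PySem.Dict.empty : PySem.Dict Int (List Int))
  (s1.items, e1.items, w1.items)

def get_prediction_map_alt (predictions : List (String × List (List (Int × Int)))) :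
    List (String × (List (Int × List Int)) × (List (Int × List Int)) × (List (Int × List Int))) :=
  (predictions.foldl (fun pm dc => pm.insert dc.1 (pyBDoc dc.2)) PySem.Dict.empty).items

-- ===== PRECONDITION & SPEC =====
def Spec_get_prediction_map (predictions : List (String × List (List (Int × Int)))) (out : List (String × (List (Int × List Int)) × (List (Int × List Int)) × (List (Int × List Int)))) : Prop := out = get_prediction_map_alt predictions
instance (predictions : List (String × List (List (Int × Int)))) (out : List (String × (List (Int × List Int)) × (List (Int × List Int)) × (List (Int × List Int)))) : Decidable (Spec_get_prediction_map predictions out) := by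
  unfold Spec_get_prediction_map
  letI h1 : DecidableEq ((List (Int × List Int)) × (List (Int × List Int)) × (List (Int × List Int))) := instDecidableEqProd
  letI h2 : DecidableEq (String × (List (Int × List Int)) × (List (Int × List Int)) × (List (Int × List Int))) := instDecidableEqProd
  infer_instance

-- ===== CLAIM (what is proved, stated in full; the proofs are below) =====
def Claim_equal_get_prediction_map : Prop := ∀ (predictions : List (String × List (List (Int × Int)))), Dom_get_prediction_map predictions → Spec_get_prediction_map predictions (get_prediction_map predictions)

-- ===== LEMMAS AND PROOFS =====

-- Set.update with only-already-present elements is the identity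
theorem pvSet_update_of_mem {α : Type} [BEq α] [LawfulBEq α] (s : PySem.Set α) (l : List α)
    (h : ∀ x ∈ l, x ∈ s) : PySem.Set.update s l = s := by
  induction l with
  | nil => rfl
  | cons x t ih =>
    rw [PySem.Set.update_eq_foldl] at *
    simp only [List.foldl_cons]
    rw [PySem.Set.add_of_mem (h x (by simp))]
    exact ih (fun y hy => h y (by simp [hy]))

-- inserting x into a (reverse-)sorted list commutes with filter
theorem pvInsertBy_filter {α : Type} (key : α → Int) (p : α → Bool) (x : α) (s : List α)
    (h : s.Pairwise (fun a b => key b ≤ key a)) :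
    (PySem.List.insertBy (fun a b => decide (key b < key a)) x s).filter p
      = if p x then PySem.List.insertBy (fun a b => decide (key b < key a)) x (s.filter p)
        else s.filter p := by
  induction s with
  | nil => by_cases hpx : p x <;> simp [PySem.List.insertBy, hpx]
  | cons y ys ih =>
    rw [List.pairwise_cons] at h
    by_cases hxy : key y < key x
    · -- x goes in front
      have : PySem.List.insertBy (fun a b => decide (key b < key a)) x (y :: ys) = x :: y :: ys := by
        simp [PySem.List.insertBy, hxy]
      rw [this]
      by_cases hpx : p x
      · simp only [hpx, if_true]
        -- every kept element z of (y::ys).filter p has key z ≤ key y < key x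
        cases hf : (y :: ys).filter p with
        | nil => simp [hpx, hf, PySem.List.insertBy]
        | cons z zs =>
          have hz : z ∈ (y :: ys) := List.mem_of_mem_filter (hf ▸ List.mem_cons_self)
          have hkz : key z ≤ key y := by
            rcases List.mem_cons.mp hz with rfl | hz'
            · exact le_refl _
            · exact h.1 z hz'
          simp [hpx, hf, PySem.List.insertBy, lt_of_le_of_lt hkz hxy]
      · simp [List.filter_cons, hpx]
    · have : PySem.List.insertBy (fun a b => decide (key b < key a)) x (y :: ys)
          = y :: PySem.List.insertBy (fun a b => decide (key b < key a)) x ys := by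
        simp [PySem.List.insertBy, hxy]
      rw [this]
      by_cases hpy : p y <;> by_cases hpx : p x <;>
        simp [hpy, hpx, ih h.2, PySem.List.insertBy, hxy]

theorem pvSorted_append_singleton {α : Type} (l : List α) (x : α) (key : α → Int) :
    PySem.List.sorted (l ++ [x]) key true
      = PySem.List.insertBy (fun a b => decide (key b < key a)) x (PySem.List.sorted l key true) := by
  simp [PySem.List.sorted, List.foldl_append]

-- one global stable sort then filter = filter then sort
theorem pvFilter_sorted {α : Type} (l : List α) (key : α → Int) (p : α → Bool) :
    (PySem.List.sorted l key true).filter p = PySem.List.sorted (l.filter p) key true := by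
  induction l using List.reverseRecOn with
  | nil => rfl
  | append_singleton l x ih =>
    rw [pvSorted_append_singleton, List.filter_append,
        pvInsertBy_filter key p x _ (PySem.List.sorted_pairwise_rev l key)]
    by_cases hpx : p x
    · simp [hpx, pvSorted_append_singleton, ih]
    · simp [hpx, ih]

theorem pvInsertBy_map {α β : Type} (f : α → β) (before : β → β → Bool) (x : α) (s : List α) :
    PySem.List.insertBy before (f x) (s.map f)
      = (PySem.List.insertBy (fun a b => before (f a) (f b)) x s).map f := by
  induction s with
  | nil => simp [PySem.List.insertBy]
  | cons y ys ih =>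
    by_cases h : before (f x) (f y) <;> simp [PySem.List.insertBy, h, ih]

theorem pvSorted_map {α β : Type} (f : α → β) (key : β → Int) (l : List α) :
    PySem.List.sorted (l.map f) key true
      = (PySem.List.sorted l (fun a => key (f a)) true).map f := by
  induction l using List.reverseRecOn with
  | nil => rfl
  | append_singleton l x ih =>
    rw [List.map_append, List.map_singleton, pvSorted_append_singleton,
        pvSorted_append_singleton, ih, pvInsertBy_map]

-- grouping fold: value at k is the defaults plus all values with key k, in order
theorem pvGetD_group {α ν : Type} (key : α → Int) (val : α → ν) (l : List α)
    (d : PySem.Dict Int (List ν)) (k : Int) :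
    (l.foldl (fun d p => d.modify (key p) [] (fun v => v ++ [val p])) d).getD k []
      = d.getD k [] ++ (l.filter (fun p => key p == k)).map val := by
  induction l generalizing d with
  | nil => simp
  | cons x t ih =>
    simp only [List.foldl_cons, List.filter_cons, ih]
    by_cases hk : key x == k
    · have hk' : k = key x := (beq_iff_eq.mp hk).symm
      simp [hk']
    · have hk' : ¬ (k = key x) := fun h => (by simp [beq_iff_eq] at hk; exact hk h.symm)
      simp [hk, PySem.Dict.getD_modify, hk']

-- priming fold: every value is []
theorem pvGetD_prime {α : Type} (key : α → Int) (l : List α)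
    (d : PySem.Dict Int (List Int)) (k : Int) (h : d.getD k [] = []) :
    (l.foldl (fun d p => d.insert (key p) []) d).getD k [] = [] := by
  induction l generalizing d with
  | nil => simpa
  | cons x t ih =>
    simp only [List.foldl_cons]
    exact ih _ (by rw [PySem.Dict.getD_insert]; split <;> simp [h])

def pvSpansOf (ec : List (Int × List (Int × Int))) : List (Int × Int × Int) :=
  ec.flatMap (fun ce => (ce.2.filter (fun m => !(m.1 == m.2))).map (fun m => (ce.1, m.1, m.2)))

def pvWordsOf (ec : List (Int × List (Int × Int))) : List (Int × Int) :=
  ec.flatMap (fun ce => (ce.2.filter (fun m => m.1 == m.2)).map (fun m => (ce.1, m.1)))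

-- A's nested dict-building loop = three independent folds over the flat span/word lists
theorem pvA_inner (cid : Int) (ms : List (Int × Int))
    (sew : (PySem.Dict Int (List (Int × Int))) × (PySem.Dict Int (List (Int × Int))) × (PySem.Dict Int (List Int))) :
    ms.foldl (fun sew m =>
        if m.1 == m.2 then
          (sew.1, sew.2.1, sew.2.2.modify m.1 [] (fun l => l ++ [cid]))
        else
          (sew.1.modify m.1 [] (fun l => l ++ [(cid, m.2)]),
           sew.2.1.modify m.2 [] (fun l => l ++ [(cid, m.1)]),
           sew.2.2)) sew
    = (((ms.filter (fun m => !(m.1 == m.2))).map (fun m => (cid, m.1, m.2))).foldl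
         (fun d p => d.modify p.2.1 [] (fun v => v ++ [(p.1, p.2.2)])) sew.1,
       ((ms.filter (fun m => !(m.1 == m.2))).map (fun m => (cid, m.1, m.2))).foldl
         (fun d p => d.modify p.2.2 [] (fun v => v ++ [(p.1, p.2.1)])) sew.2.1,
       ((ms.filter (fun m => m.1 == m.2)).map (fun m => (cid, m.1))).foldl
         (fun d p => d.modify p.2 [] (fun v => v ++ [p.1])) sew.2.2) := by
  induction ms generalizing sew with
  | nil => simp
  | cons m t ih =>
    by_cases h : m.1 == m.2 <;>
      simp only [List.foldl_cons, List.filter_cons, h, Bool.not_true, Bool.not_false] <;>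
      (rw [ih]; simp)

theorem pvA_fold (ec : List (Int × List (Int × Int)))
    (sew : (PySem.Dict Int (List (Int × Int))) × (PySem.Dict Int (List (Int × Int))) × (PySem.Dict Int (List Int))) :
    ec.foldl (fun sew ce =>
      ce.2.foldl (fun sew m =>
        if m.1 == m.2 then
          (sew.1, sew.2.1, sew.2.2.modify m.1 [] (fun l => l ++ [ce.1]))
        else
          (sew.1.modify m.1 [] (fun l => l ++ [(ce.1, m.2)]),
           sew.2.1.modify m.2 [] (fun l => l ++ [(ce.1, m.1)]),
           sew.2.2)) sew) sew
    = ((pvSpansOf ec).foldl (fun d p => d.modify p.2.1 [] (fun v => v ++ [(p.1, p.2.2)])) sew.1,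
       (pvSpansOf ec).foldl (fun d p => d.modify p.2.2 [] (fun v => v ++ [(p.1, p.2.1)])) sew.2.1,
       (pvWordsOf ec).foldl (fun d p => d.modify p.2 [] (fun v => v ++ [p.1])) sew.2.2) := by
  induction ec generalizing sew with
  | nil => simp [pvSpansOf, pvWordsOf]
  | cons ce t ih =>
    simp only [List.foldl_cons, pvSpansOf, pvWordsOf, List.flatMap_cons, List.foldl_append]
    rw [pvA_inner, ih]; rfl

-- B's flattening loop = the same flat lists
theorem pvB_inner (cid : Int) (ms : List (Int × Int)) (ws : List (Int × Int) × List (Int × Int × Int)) :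
    ms.foldl (fun ws m =>
        if m.1 == m.2 then (ws.1 ++ [(cid, m.1)], ws.2)
        else (ws.1, ws.2 ++ [(cid, m.1, m.2)])) ws
    = (ws.1 ++ (ms.filter (fun m => m.1 == m.2)).map (fun m => (cid, m.1)),
       ws.2 ++ (ms.filter (fun m => !(m.1 == m.2))).map (fun m => (cid, m.1, m.2))) := by
  induction ms generalizing ws with
  | nil => simp
  | cons m t ih =>
    by_cases h : m.1 == m.2 <;>
      simp only [List.foldl_cons, List.filter_cons, h, Bool.not_true, Bool.not_false] <;>
      (rw [ih]; simp)

theorem pvB_fold (ec : List (Int × List (Int × Int))) (ws : List (Int × Int) × List (Int × Int × Int)) :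
    ec.foldl (fun ws ce =>
      ce.2.foldl (fun ws m =>
        if m.1 == m.2 then (ws.1 ++ [(ce.1, m.1)], ws.2)
        else (ws.1, ws.2 ++ [(ce.1, m.1, m.2)])) ws) ws
    = (ws.1 ++ pvWordsOf ec, ws.2 ++ pvSpansOf ec) := by
  induction ec generalizing ws with
  | nil => simp [pvSpansOf, pvWordsOf]
  | cons ce t ih =>
    simp only [List.foldl_cons, pvSpansOf, pvWordsOf, List.flatMap_cons]
    rw [pvB_inner, ih]
    simp [pvSpansOf, pvWordsOf]

-- the start-map component: bucket-wise sort (A) = global sort then distribute (B)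
theorem pvStart_eq (spans : List (Int × Int × Int)) :
    (List.foldl (fun d kv => d.insert kv.1 ((PySem.List.sorted kv.2 (fun p => p.2) true).map (fun p => p.1)))
        (PySem.Dict.empty : PySem.Dict Int (List Int))
        (List.foldl (fun d p => d.modify p.2.1 [] (fun v => v ++ [(p.1, p.2.2)]))
          (PySem.Dict.empty : PySem.Dict Int (List (Int × Int))) spans).items).items
    = (List.foldl (fun d p => d.modify p.2.1 [] (fun l => l ++ [p.1]))
        (List.foldl (fun d p => d.insert p.2.1 ([] : List Int))
          (PySem.Dict.empty : PySem.Dict Int (List Int)) spans)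
        (PySem.List.sorted spans (fun p => p.2.2) true)).items := by
  have hSnodup : (List.foldl (fun d p => d.modify p.2.1 [] (fun v => v ++ [(p.1, p.2.2)]))
      (PySem.Dict.empty : PySem.Dict Int (List (Int × Int))) spans).keys.Nodup :=
    PySem.Dict.nodup_keys_foldl_modify_key spans (fun p => p.2.1) [] (fun _ p => fun v => v ++ [(p.1, p.2.2)]) _
      PySem.Dict.nodup_keys_empty
  have hprnodup : (List.foldl (fun d p => d.insert p.2.1 ([] : List Int))
      (PySem.Dict.empty : PySem.Dict Int (List Int)) spans).keys.Nodup :=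
    PySem.Dict.nodup_keys_foldl_insert_key spans (fun p => p.2.1) (fun _ _ => []) _
      PySem.Dict.nodup_keys_empty
  have hs1nodup : (List.foldl (fun d p => d.modify p.2.1 [] (fun l => l ++ [p.1]))
      (List.foldl (fun d p => d.insert p.2.1 ([] : List Int))
        (PySem.Dict.empty : PySem.Dict Int (List Int)) spans)
      (PySem.List.sorted spans (fun p => p.2.2) true)).keys.Nodup :=
    PySem.Dict.nodup_keys_foldl_modify_key (PySem.List.sorted spans (fun p => p.2.2) true) (fun p => p.2.1) [] (fun _ p => fun l => l ++ [p.1]) _ hprnodup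
  -- left side: re-inserting every item of S into an empty dict is a map over S.items
  have hA := PySem.Dict.items_foldl_insert_fresh
      (List.foldl (fun d p => d.modify p.2.1 [] (fun v => v ++ [(p.1, p.2.2)]))
        (PySem.Dict.empty : PySem.Dict Int (List (Int × Int))) spans).items
      (fun kv => kv.1)
      (fun kv => (PySem.List.sorted kv.2 (fun p => p.2) true).map (fun p => p.1))
      (PySem.Dict.empty : PySem.Dict Int (List Int))
      (fun a _ => PySem.Dict.contains_empty _)
      (show (((List.foldl (fun d p => d.modify p.2.1 [] (fun v => v ++ [(p.1, p.2.2)]))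
          (PySem.Dict.empty : PySem.Dict Int (List (Int × Int))) spans).items).map (fun kv => kv.1)).Nodup
        from hSnodup)
  rw [hA]
  rw [PySem.Dict.items_eq_map_keys _ hSnodup [], PySem.Dict.items_eq_map_keys _ hs1nodup []]
  -- both key lists are the starts in first-occurrence order
  have hkeys : (List.foldl (fun d p => d.modify p.2.1 [] (fun l => l ++ [p.1]))
      (List.foldl (fun d p => d.insert p.2.1 ([] : List Int))
        (PySem.Dict.empty : PySem.Dict Int (List Int)) spans)
      (PySem.List.sorted spans (fun p => p.2.2) true)).keys
      = (List.foldl (fun d p => d.modify p.2.1 [] (fun v => v ++ [(p.1, p.2.2)]))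
          (PySem.Dict.empty : PySem.Dict Int (List (Int × Int))) spans).keys := by
    rw [PySem.Dict.keys_foldl_modify_key, PySem.Dict.keys_foldl_insert_key,
        PySem.Dict.keys_foldl_modify_key]
    apply pvSet_update_of_mem
    intro x hx
    rcases List.mem_map.mp hx with ⟨p, hp, rfl⟩
    have hp' : p ∈ spans := (PySem.List.sorted_perm spans (fun p => p.2.2) true).mem_iff.mp hp
    exact (PySem.Set.mem_update _ _ _).mpr (Or.inr (List.mem_map_of_mem hp'))
  rw [hkeys, List.map_map]
  apply List.map_congr_left
  intro k _
  simp only [Function.comp_def]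
  rw [pvGetD_group, pvGetD_group, pvGetD_prime _ _ _ _ (PySem.Dict.getD_empty _ _),
      PySem.Dict.getD_empty, pvFilter_sorted, List.nil_append, List.nil_append]
  rw [pvSorted_map (fun p : Int × Int × Int => (p.1, p.2.2)) (fun q : Int × Int => q.2)
      (spans.filter (fun p => p.2.1 == k)), List.map_map]
  simp [Function.comp_def]

-- the end-map component, symmetrically
theorem pvEnd_eq (spans : List (Int × Int × Int)) :
    (List.foldl (fun d kv => d.insert kv.1 ((PySem.List.sorted kv.2 (fun p => p.2) true).map (fun p => p.1)))
        (PySem.Dict.empty : PySem.Dict Int (List Int))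
        (List.foldl (fun d p => d.modify p.2.2 [] (fun v => v ++ [(p.1, p.2.1)]))
          (PySem.Dict.empty : PySem.Dict Int (List (Int × Int))) spans).items).items
    = (List.foldl (fun d p => d.modify p.2.2 [] (fun l => l ++ [p.1]))
        (List.foldl (fun d p => d.insert p.2.2 ([] : List Int))
          (PySem.Dict.empty : PySem.Dict Int (List Int)) spans)
        (PySem.List.sorted spans (fun p => p.2.1) true)).items := by
  have hSnodup : (List.foldl (fun d p => d.modify p.2.2 [] (fun v => v ++ [(p.1, p.2.1)]))
      (PySem.Dict.empty : PySem.Dict Int (List (Int × Int))) spans).keys.Nodup :=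
    PySem.Dict.nodup_keys_foldl_modify_key spans (fun p => p.2.2) [] (fun _ p => fun v => v ++ [(p.1, p.2.1)]) _
      PySem.Dict.nodup_keys_empty
  have hprnodup : (List.foldl (fun d p => d.insert p.2.2 ([] : List Int))
      (PySem.Dict.empty : PySem.Dict Int (List Int)) spans).keys.Nodup :=
    PySem.Dict.nodup_keys_foldl_insert_key spans (fun p => p.2.2) (fun _ _ => []) _
      PySem.Dict.nodup_keys_empty
  have hs1nodup : (List.foldl (fun d p => d.modify p.2.2 [] (fun l => l ++ [p.1]))
      (List.foldl (fun d p => d.insert p.2.2 ([] : List Int))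
        (PySem.Dict.empty : PySem.Dict Int (List Int)) spans)
      (PySem.List.sorted spans (fun p => p.2.1) true)).keys.Nodup :=
    PySem.Dict.nodup_keys_foldl_modify_key (PySem.List.sorted spans (fun p => p.2.1) true) (fun p => p.2.2) [] (fun _ p => fun l => l ++ [p.1]) _ hprnodup
  -- left side: re-inserting every item of S into an empty dict is a map over S.items
  have hA := PySem.Dict.items_foldl_insert_fresh
      (List.foldl (fun d p => d.modify p.2.2 [] (fun v => v ++ [(p.1, p.2.1)]))
        (PySem.Dict.empty : PySem.Dict Int (List (Int × Int))) spans).items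
      (fun kv => kv.1)
      (fun kv => (PySem.List.sorted kv.2 (fun p => p.2) true).map (fun p => p.1))
      (PySem.Dict.empty : PySem.Dict Int (List Int))
      (fun a _ => PySem.Dict.contains_empty _)
      (show (((List.foldl (fun d p => d.modify p.2.2 [] (fun v => v ++ [(p.1, p.2.1)]))
          (PySem.Dict.empty : PySem.Dict Int (List (Int × Int))) spans).items).map (fun kv => kv.1)).Nodup
        from hSnodup)
  rw [hA]
  rw [PySem.Dict.items_eq_map_keys _ hSnodup [], PySem.Dict.items_eq_map_keys _ hs1nodup []]
  -- both key lists are the starts in first-occurrence order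
  have hkeys : (List.foldl (fun d p => d.modify p.2.2 [] (fun l => l ++ [p.1]))
      (List.foldl (fun d p => d.insert p.2.2 ([] : List Int))
        (PySem.Dict.empty : PySem.Dict Int (List Int)) spans)
      (PySem.List.sorted spans (fun p => p.2.1) true)).keys
      = (List.foldl (fun d p => d.modify p.2.2 [] (fun v => v ++ [(p.1, p.2.1)]))
          (PySem.Dict.empty : PySem.Dict Int (List (Int × Int))) spans).keys := by
    rw [PySem.Dict.keys_foldl_modify_key, PySem.Dict.keys_foldl_insert_key,
        PySem.Dict.keys_foldl_modify_key]
    apply pvSet_update_of_mem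
    intro x hx
    rcases List.mem_map.mp hx with ⟨p, hp, rfl⟩
    have hp' : p ∈ spans := (PySem.List.sorted_perm spans (fun p => p.2.1) true).mem_iff.mp hp
    exact (PySem.Set.mem_update _ _ _).mpr (Or.inr (List.mem_map_of_mem hp'))
  rw [hkeys, List.map_map]
  apply List.map_congr_left
  intro k _
  simp only [Function.comp_def]
  rw [pvGetD_group, pvGetD_group, pvGetD_prime _ _ _ _ (PySem.Dict.getD_empty _ _),
      PySem.Dict.getD_empty, pvFilter_sorted, List.nil_append, List.nil_append]
  rw [pvSorted_map (fun p : Int × Int × Int => (p.1, p.2.1)) (fun q : Int × Int => q.2)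
      (spans.filter (fun p => p.2.2 == k)), List.map_map]
  simp [Function.comp_def]

theorem pvDoc_eq (clusters : List (List (Int × Int))) : pyADoc clusters = pyBDoc clusters := by
  simp only [pyADoc, pyBDoc]
  rw [pvA_fold, pvB_fold]
  dsimp only
  simp only [List.nil_append]
  rw [PySem.List.foldl_prod_mk
        (f := fun (d : PySem.Dict Int (List Int)) (p : Int × Int × Int) => d.insert p.2.1 [])
        (g := fun (d : PySem.Dict Int (List Int)) (p : Int × Int × Int) => d.insert p.2.2 [])]
  dsimp only
  exact Prod.ext (pvStart_eq _) (Prod.ext (pvEnd_eq _) rfl)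

-- ===== VERDICT (by name: the statement is the Claim_ definition above) =====
theorem get_prediction_map_spec : Claim_equal_get_prediction_map := by
  intro preds _
  unfold Spec_get_prediction_map get_prediction_map get_prediction_map_alt
  rw [show pyADoc = pyBDoc from funext pvDoc_eq]
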